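-- pv_equiv track=rewrite | github.com/fiatrete/OpenDAN-Personal-AI-OS | src/aios_kernel/workflow.py | get_workflow_id_from_target
-- ===== SOURCE A (Python) =====
-- def get_workflow_id_from_target(target:str) -> str:
--     target_list = target.split(".")
--     if len(target_list) == 0:
--         return target
--     else:
--         result_str = ""
--         p = 0
--         for s in target_list:
--             p = p + 1
--             result_str += s
--             if p < len(target_list)-1:
--                 result_str += "."
--             else:
--                 return result_str
-- ===== SOURCE B (Python) =====
-- def get_workflow_id_from_target(target: str) -> str:
--     parts = target.split(".")
--     if len(parts) < 2:
--         return target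
--     return ".".join(parts[:-1])
-- ===== Notes on version B (the rewrite author's own statement) =====
-- stated objective: simpler
-- what changed: Replaces the counter-driven character-accumulation loop with its early return at the off-by-one boundary by dropping the last dotted segment and joining the remaining segments with a dot, keeping the single-segment case returning the whole target.
import Mathlib
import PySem

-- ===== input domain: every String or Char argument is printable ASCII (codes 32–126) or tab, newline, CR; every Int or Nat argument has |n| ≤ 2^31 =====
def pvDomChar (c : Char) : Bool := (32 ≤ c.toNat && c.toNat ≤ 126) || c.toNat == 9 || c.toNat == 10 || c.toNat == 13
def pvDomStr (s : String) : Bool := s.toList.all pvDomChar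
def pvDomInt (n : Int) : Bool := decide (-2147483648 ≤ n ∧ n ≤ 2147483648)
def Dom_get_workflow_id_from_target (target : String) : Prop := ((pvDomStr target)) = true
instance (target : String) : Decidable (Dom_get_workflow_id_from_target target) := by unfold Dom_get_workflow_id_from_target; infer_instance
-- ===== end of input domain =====

-- B replaces A's counter-driven accumulation loop (early return at the off-by-one boundary)
-- by dropping the last dotted segment and joining the rest; objective: simpler.


-- ===== PORT A =====
-- the for-loop over target_list: p counter, result_str accumulator, early 'return result_str'
-- (some r); 'none' = the loop runs off the end (Python falls through, returning None) —
-- unreachable, since str.split never returns an empty list.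
def pvLoopA : List (List Char) → List Char → Nat → Nat → Option (List Char)
  | [], _, _, _ => none
  | s :: rest, res, p, n =>
    let p' := p + 1
    let res' := res ++ s
    if p' < n - 1 then pvLoopA rest (res' ++ ['.']) p' n
    else some res'

def get_workflow_id_from_target (target : String) : String :=
  let target_list := PySem.Chars.splitOn target.toList ['.']
  if target_list.length = 0 then target
  else
    match pvLoopA target_list [] 0 target_list.length with
    | some r => String.ofList r
    | none => target    -- unreachable: split never returns []

-- ===== PORT B =====
def get_workflow_id_from_target_alt (target : String) : String :=
  let parts := PySem.Chars.splitOn target.toList ['.']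
  if parts.length < 2 then target
  else String.ofList (PySem.Chars.join ['.'] (PySem.List.slice parts none (some (-1))))

-- ===== PRECONDITION & SPEC =====
def Spec_get_workflow_id_from_target (target : String) (out : String) : Prop := out = get_workflow_id_from_target_alt target
instance (target : String) (out : String) : Decidable (Spec_get_workflow_id_from_target target out) := by unfold Spec_get_workflow_id_from_target; infer_instance

-- ===== CLAIM (what is proved, stated in full; the proofs are below) =====
def Claim_equal_get_workflow_id_from_target : Prop := ∀ (target : String), Dom_get_workflow_id_from_target target → Spec_get_workflow_id_from_target target (get_workflow_id_from_target target)

-- ===== LEMMAS AND PROOFS =====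

-- structural version of PySem.Chars.splitOn on the one-char separator '.' (proof helper)
def pvSplit : List Char → List (List Char)
  | [] => [[]]
  | c :: rest => if c = '.' then [] :: pvSplit rest else (pvSplit rest).modifyHead (c :: ·)

lemma pv_go_spec (fuel : Nat) : ∀ (l cur : List Char) (acc : List (List Char)),
    l.length + 1 ≤ fuel →
    PySem.Chars.splitOn.go ['.'] fuel l cur acc
      = acc.reverse ++ (pvSplit l).modifyHead (cur.reverse ++ ·) := by
  induction fuel with
  | zero => intro l cur acc h; omega
  | succ f ih =>
    intro l cur acc h
    cases l with
    | nil =>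
      show (cur.reverse :: acc).reverse = _
      simp [pvSplit]
    | cons c rest =>
      show (if ['.'].isPrefixOf (c :: rest) then
              PySem.Chars.splitOn.go ['.'] f (List.drop 1 (c :: rest)) [] (cur.reverse :: acc)
            else PySem.Chars.splitOn.go ['.'] f rest (c :: cur) acc) = _
      simp only [List.isPrefixOf, List.drop_succ_cons, List.drop_zero]
      by_cases hc : c = '.'
      · subst hc
        simp only [beq_self_eq_true, Bool.and_eq_true, and_self, if_true]
        rw [ih rest [] (cur.reverse :: acc) (by simp at h ⊢; omega)]
        simp only [pvSplit, if_true, List.reverse_nil, List.nil_append, List.reverse_cons,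
          List.modifyHead_cons, List.append_assoc]
        cases pvSplit rest <;> simp
      · have hfalse : (('.' == c) && true) = false := by
          simp; exact fun hh => hc hh.symm
        rw [hfalse]
        simp only [Bool.false_eq_true, if_false]
        rw [ih rest (c :: cur) acc (by simp at h ⊢; omega)]
        simp [pvSplit, hc, List.modifyHead_modifyHead, Function.comp_def]

lemma pv_splitOn_eq (cs : List Char) : PySem.Chars.splitOn cs ['.'] = pvSplit cs := by
  show PySem.Chars.splitOn.go ['.'] (cs.length + 1) cs [] [] = _
  rw [pv_go_spec (cs.length + 1) cs [] [] (le_refl _)]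
  simp only [List.reverse_nil, List.nil_append]
  cases pvSplit cs <;> simp

lemma pv_pvSplit_ne_nil (cs : List Char) : pvSplit cs ≠ [] := by
  cases cs with
  | nil => simp [pvSplit]
  | cons c rest =>
    simp only [pvSplit]
    split
    · simp
    · intro h
      have := congrArg List.length h
      simp at this
      exact pv_pvSplit_ne_nil rest this

lemma pv_join_pvSplit (cs : List Char) : PySem.Chars.join ['.'] (pvSplit cs) = cs := by
  induction cs with
  | nil => simp [pvSplit, PySem.Chars.join_singleton]
  | cons c rest ih =>
    obtain ⟨q, t, hqt⟩ := List.exists_cons_of_ne_nil (pv_pvSplit_ne_nil rest)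
    simp only [pvSplit]
    split
    · next hc =>
      subst hc
      rw [hqt, PySem.Chars.join_cons_cons, ← hqt, ih]
      simp
    · rw [hqt, List.modifyHead_cons]
      cases t with
      | nil =>
        rw [PySem.Chars.join_singleton]
        rw [hqt, PySem.Chars.join_singleton] at ih
        rw [ih]
      | cons t0 t1 =>
        rw [hqt, PySem.Chars.join_cons_cons] at ih
        rw [PySem.Chars.join_cons_cons, ← ih]
        simp

lemma pv_loopA_eq : ∀ (ts : List (List Char)) (res : List Char) (p : Nat), ts ≠ [] →
    pvLoopA ts res p (p + ts.length)
      = some (res ++ PySem.Chars.join ['.'] (ts.take (max 1 (ts.length - 1)))) := by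
  intro ts
  induction ts with
  | nil => intro _ _ h; exact absurd rfl h
  | cons s rest ih =>
    intro res p _
    simp only [pvLoopA, List.length_cons]
    by_cases h2 : 1 < rest.length
    · rw [if_pos (by omega)]
      have hn : p + (rest.length + 1) = (p + 1) + rest.length := by omega
      rw [hn, ih (res ++ s ++ ['.']) (p + 1) (by intro h; simp [h] at h2)]
      have hmax : max 1 (rest.length - 1) = rest.length - 1 := by omega
      have hmax2 : max 1 (rest.length + 1 - 1) = rest.length := by omega
      obtain ⟨q, t, hqt⟩ := List.exists_cons_of_ne_nil
        (show rest.take (rest.length - 1) ≠ [] by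
          intro h; have := congrArg List.length h; simp at this; omega)
      rw [hmax, hmax2,
        show List.take rest.length (s :: rest) = s :: List.take (rest.length - 1) rest from by
          rw [← List.take_succ_cons]; congr 1; omega,
        hqt, PySem.Chars.join_cons_cons]
      simp
    · rw [if_neg (by omega)]
      have hmax2 : max 1 (rest.length + 1 - 1) = 1 := by omega
      rw [hmax2, List.take_succ_cons, List.take_zero, PySem.Chars.join_singleton]

-- ===== VERDICT (by name: the statement is the Claim_ definition above) =====
theorem get_workflow_id_from_target_spec : Claim_equal_get_workflow_id_from_target := by
  intro target _
  unfold Spec_get_workflow_id_from_target get_workflow_id_from_target get_workflow_id_from_target_alt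
  rw [pv_splitOn_eq]
  have hne := pv_pvSplit_ne_nil target.toList
  have hjoin := pv_join_pvSplit target.toList
  rw [if_neg (by simpa using hne)]
  have hloop := pv_loopA_eq (pvSplit target.toList) [] 0 hne
  rw [Nat.zero_add] at hloop
  rw [hloop]
  simp only [List.nil_append]
  rcases Nat.lt_or_ge (pvSplit target.toList).length 2 with h2 | h2
  · -- single segment: the loop returns the whole target
    have h1 : (pvSplit target.toList).length = 1 := by
      rcases Nat.eq_zero_or_pos (pvSplit target.toList).length with h0 | h0
      · exact absurd (List.length_eq_zero_iff.mp h0) hne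
      · omega
    obtain ⟨p, hp⟩ := List.length_eq_one_iff.mp h1
    rw [if_pos (by omega)]
    rw [hp] at hjoin ⊢
    rw [PySem.Chars.join_singleton] at hjoin
    simp [PySem.Chars.join_singleton, hjoin, String.ofList_toList]
  · rw [if_neg (by omega), PySem.List.slice_to_neg_one, List.dropLast_eq_take]
    have hmax : max 1 ((pvSplit target.toList).length - 1)
        = (pvSplit target.toList).length - 1 := by omega
    rw [hmax]
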